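-- pv_equiv track=rewrite | github.com/DennisBravo/cadevoce | backend/services/rules.py | region_matches
-- ===== SOURCE A (Python) =====
-- _BR_EQUIV = {
--     "AC": {"AC", "ACRE"},
--     "AL": {"AL", "ALAGOAS"},
--     "AP": {"AP", "AMAPÁ", "AMAPA"},
--     "AM": {"AM", "AMAZONAS"},
--     "BA": {"BA", "BAHIA"},
--     "CE": {"CE", "CEARÁ", "CEARA"},
--     "DF": {"DF", "DISTRITO FEDERAL"},
--     "ES": {"ES", "ESPÍRITO SANTO", "ESPIRITO SANTO"},
--     "GO": {"GO", "GOIÁS", "GOIAS"},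
--     "MA": {"MA", "MARANHÃO", "MARANHAO"},
--     "MT": {"MT", "MATO GROSSO"},
--     "MS": {"MS", "MATO GROSSO DO SUL"},
--     "MG": {"MG", "MINAS GERAIS"},
--     "PA": {"PA", "PARÁ", "PARA"},
--     "PB": {"PB", "PARAÍBA", "PARAIBA"},
--     "PR": {"PR", "PARANÁ", "PARANA"},
--     "PE": {"PE", "PERNAMBUCO"},
--     "PI": {"PI", "PIAUÍ", "PIAUI"},
--     "RJ": {"RJ", "RIO DE JANEIRO"},
--     "RN": {"RN", "RIO GRANDE DO NORTE"},
--     "RS": {"RS", "RIO GRANDE DO SUL"},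
--     "RO": {"RO", "RONDÔNIA", "RONDONIA"},
--     "RR": {"RR", "RORAIMA"},
--     "SC": {"SC", "SANTA CATARINA"},
--     "SP": {"SP", "SÃO PAULO", "SAO PAULO"},
--     "SE": {"SE", "SERGIPE"},
--     "TO": {"TO", "TOCANTINS"},
-- }
--
-- def _normalize(s: str | None) -> str:
--     if not s:
--         return ""
--     return " ".join(s.upper().strip().split())
--
-- def region_matches(estado_permitido: str, region_detectada: str | None) -> bool:
--     """
--     Retorna True se a região detectada for equivalente ao estado permitido.
--     Comparação case-insensitive; inclui equivalências para estados brasileiros.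
--     """
--     permitido = _normalize(estado_permitido)
--     detectada = _normalize(region_detectada)
--
--     if not permitido:
--         return False
--     if not detectada:
--         return False
--
--     if permitido == detectada:
--         return True
--
--     equiv = _BR_EQUIV.get(permitido)
--     if equiv and detectada in equiv:
--         return True
--
--     for sigla, nomes in _BR_EQUIV.items():
--         if permitido in nomes and detectada in nomes:
--             return True
--         if permitido == sigla and detectada in nomes:
--             return True
--
--     return False
-- ===== SOURCE B (Python) =====
-- # Canonicalization table: every accepted spelling (sigla or full name) -> its sigla.
-- # Siglas map to themselves, so CANON.get(x, x) is a total canonical form.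
-- CANON = {
--     "AC": "AC",
--     "ACRE": "AC",
--     "AL": "AL",
--     "ALAGOAS": "AL",
--     "AP": "AP",
--     "AMAPA": "AP",
--     "AMAPÁ": "AP",
--     "AM": "AM",
--     "AMAZONAS": "AM",
--     "BA": "BA",
--     "BAHIA": "BA",
--     "CE": "CE",
--     "CEARA": "CE",
--     "CEARÁ": "CE",
--     "DF": "DF",
--     "DISTRITO FEDERAL": "DF",
--     "ES": "ES",
--     "ESPIRITO SANTO": "ES",
--     "ESPÍRITO SANTO": "ES",
--     "GO": "GO",
--     "GOIAS": "GO",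
--     "GOIÁS": "GO",
--     "MA": "MA",
--     "MARANHAO": "MA",
--     "MARANHÃO": "MA",
--     "MT": "MT",
--     "MATO GROSSO": "MT",
--     "MS": "MS",
--     "MATO GROSSO DO SUL": "MS",
--     "MG": "MG",
--     "MINAS GERAIS": "MG",
--     "PA": "PA",
--     "PARA": "PA",
--     "PARÁ": "PA",
--     "PB": "PB",
--     "PARAIBA": "PB",
--     "PARAÍBA": "PB",
--     "PR": "PR",
--     "PARANA": "PR",
--     "PARANÁ": "PR",
--     "PE": "PE",
--     "PERNAMBUCO": "PE",
--     "PI": "PI",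
--     "PIAUI": "PI",
--     "PIAUÍ": "PI",
--     "RJ": "RJ",
--     "RIO DE JANEIRO": "RJ",
--     "RN": "RN",
--     "RIO GRANDE DO NORTE": "RN",
--     "RS": "RS",
--     "RIO GRANDE DO SUL": "RS",
--     "RO": "RO",
--     "RONDONIA": "RO",
--     "RONDÔNIA": "RO",
--     "RR": "RR",
--     "RORAIMA": "RR",
--     "SC": "SC",
--     "SANTA CATARINA": "SC",
--     "SP": "SP",
--     "SAO PAULO": "SP",
--     "SÃO PAULO": "SP",
--     "SE": "SE",
--     "SERGIPE": "SE",
--     "TO": "TO",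
--     "TOCANTINS": "TO",
-- }
--
--
-- def _normalize(s):
--     if not s:
--         return ""
--     return " ".join(s.upper().strip().split())
--
--
-- def region_matches(estado_permitido, region_detectada):
--     permitido = _normalize(estado_permitido)
--     detectada = _normalize(region_detectada)
--     return (permitido != "" and detectada != ""
--             and CANON.get(permitido, permitido) == CANON.get(detectada, detectada))
-- ===== Notes on version B (the rewrite author's own statement) =====
-- stated objective: alternative
-- what changed: Replaces A's early-return chain plus per-call scan over the 27-entry equivalence dict with a flat literal canonicalization table name->sigla and one comparison CANON.get(p,p)==CANON.get(d,d), whose default-to-self lookup also subsumes the p==d early return.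
import Mathlib
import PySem

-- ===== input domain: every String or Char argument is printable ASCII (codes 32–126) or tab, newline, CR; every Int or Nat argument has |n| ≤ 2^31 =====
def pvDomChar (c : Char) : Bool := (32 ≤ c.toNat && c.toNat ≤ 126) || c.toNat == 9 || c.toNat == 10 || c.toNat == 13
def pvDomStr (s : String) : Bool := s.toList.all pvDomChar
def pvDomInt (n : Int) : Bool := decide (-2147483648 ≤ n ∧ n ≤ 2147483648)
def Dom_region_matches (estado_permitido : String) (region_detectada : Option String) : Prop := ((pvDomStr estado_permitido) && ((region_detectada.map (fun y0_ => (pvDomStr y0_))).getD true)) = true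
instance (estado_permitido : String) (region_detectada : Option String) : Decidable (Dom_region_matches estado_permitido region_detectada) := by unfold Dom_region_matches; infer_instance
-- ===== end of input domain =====

-- B replaces A's early-return chain plus per-call scan over the 27-entry equivalence table by a
-- flat canonicalization map name → sigla with default-to-self lookup: one comparison of canonical forms.

-- shared module-level helper _normalize(s): '' for falsy input, else " ".join(s.upper().strip().split())
def pyNormalize (s : Option String) : String :=
  match s with
  | none => ""
  | some t =>
      if t == "" then ""
      else PySem.Str.join " " (PySem.Str.split₀ (PySem.Str.strip (PySem.Str.upper t)))

-- ===== PORT A =====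
-- module-level constant _BR_EQUIV; each value is a Python set literal
def brEquiv : List (String × List String) := [
  ("AC", PySem.Set.ofList ["AC", "ACRE"]),
  ("AL", PySem.Set.ofList ["AL", "ALAGOAS"]),
  ("AP", PySem.Set.ofList ["AP", "AMAPÁ", "AMAPA"]),
  ("AM", PySem.Set.ofList ["AM", "AMAZONAS"]),
  ("BA", PySem.Set.ofList ["BA", "BAHIA"]),
  ("CE", PySem.Set.ofList ["CE", "CEARÁ", "CEARA"]),
  ("DF", PySem.Set.ofList ["DF", "DISTRITO FEDERAL"]),
  ("ES", PySem.Set.ofList ["ES", "ESPÍRITO SANTO", "ESPIRITO SANTO"]),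
  ("GO", PySem.Set.ofList ["GO", "GOIÁS", "GOIAS"]),
  ("MA", PySem.Set.ofList ["MA", "MARANHÃO", "MARANHAO"]),
  ("MT", PySem.Set.ofList ["MT", "MATO GROSSO"]),
  ("MS", PySem.Set.ofList ["MS", "MATO GROSSO DO SUL"]),
  ("MG", PySem.Set.ofList ["MG", "MINAS GERAIS"]),
  ("PA", PySem.Set.ofList ["PA", "PARÁ", "PARA"]),
  ("PB", PySem.Set.ofList ["PB", "PARAÍBA", "PARAIBA"]),
  ("PR", PySem.Set.ofList ["PR", "PARANÁ", "PARANA"]),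
  ("PE", PySem.Set.ofList ["PE", "PERNAMBUCO"]),
  ("PI", PySem.Set.ofList ["PI", "PIAUÍ", "PIAUI"]),
  ("RJ", PySem.Set.ofList ["RJ", "RIO DE JANEIRO"]),
  ("RN", PySem.Set.ofList ["RN", "RIO GRANDE DO NORTE"]),
  ("RS", PySem.Set.ofList ["RS", "RIO GRANDE DO SUL"]),
  ("RO", PySem.Set.ofList ["RO", "RONDÔNIA", "RONDONIA"]),
  ("RR", PySem.Set.ofList ["RR", "RORAIMA"]),
  ("SC", PySem.Set.ofList ["SC", "SANTA CATARINA"]),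
  ("SP", PySem.Set.ofList ["SP", "SÃO PAULO", "SAO PAULO"]),
  ("SE", PySem.Set.ofList ["SE", "SERGIPE"]),
  ("TO", PySem.Set.ofList ["TO", "TOCANTINS"])]

def brDict : PySem.Dict String (List String) := PySem.Dict.ofList brEquiv

def region_matches (estado_permitido : String) (region_detectada : Option String) : Bool :=
  let permitido := pyNormalize (some estado_permitido)
  let detectada := pyNormalize region_detectada
  if permitido == "" then false
  else if detectada == "" then false
  else if permitido == detectada then true
  else
    -- equiv = _BR_EQUIV.get(permitido); if equiv and detectada in equiv (empty set is falsy; contains is then false too)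
    let hit := match brDict.get? permitido with
      | some equiv => equiv.contains detectada
      | none => false
    if hit then true
    else
      -- for sigla, nomes in _BR_EQUIV.items(): return True on first matching condition
      brDict.items.any (fun sn =>
        (sn.2.contains permitido && sn.2.contains detectada) ||
        (permitido == sn.1 && sn.2.contains detectada))

-- ===== PORT B =====
-- CANON: flat literal map, every accepted spelling → its sigla (siglas map to themselves)
def canonPairs : List (String × String) := [
  ("AC", "AC"),
  ("ACRE", "AC"),
  ("AL", "AL"),
  ("ALAGOAS", "AL"),
  ("AP", "AP"),
  ("AMAPA", "AP"),
  ("AMAPÁ", "AP"),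
  ("AM", "AM"),
  ("AMAZONAS", "AM"),
  ("BA", "BA"),
  ("BAHIA", "BA"),
  ("CE", "CE"),
  ("CEARA", "CE"),
  ("CEARÁ", "CE"),
  ("DF", "DF"),
  ("DISTRITO FEDERAL", "DF"),
  ("ES", "ES"),
  ("ESPIRITO SANTO", "ES"),
  ("ESPÍRITO SANTO", "ES"),
  ("GO", "GO"),
  ("GOIAS", "GO"),
  ("GOIÁS", "GO"),
  ("MA", "MA"),
  ("MARANHAO", "MA"),
  ("MARANHÃO", "MA"),
  ("MT", "MT"),
  ("MATO GROSSO", "MT"),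
  ("MS", "MS"),
  ("MATO GROSSO DO SUL", "MS"),
  ("MG", "MG"),
  ("MINAS GERAIS", "MG"),
  ("PA", "PA"),
  ("PARA", "PA"),
  ("PARÁ", "PA"),
  ("PB", "PB"),
  ("PARAIBA", "PB"),
  ("PARAÍBA", "PB"),
  ("PR", "PR"),
  ("PARANA", "PR"),
  ("PARANÁ", "PR"),
  ("PE", "PE"),
  ("PERNAMBUCO", "PE"),
  ("PI", "PI"),
  ("PIAUI", "PI"),
  ("PIAUÍ", "PI"),
  ("RJ", "RJ"),
  ("RIO DE JANEIRO", "RJ"),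
  ("RN", "RN"),
  ("RIO GRANDE DO NORTE", "RN"),
  ("RS", "RS"),
  ("RIO GRANDE DO SUL", "RS"),
  ("RO", "RO"),
  ("RONDONIA", "RO"),
  ("RONDÔNIA", "RO"),
  ("RR", "RR"),
  ("RORAIMA", "RR"),
  ("SC", "SC"),
  ("SANTA CATARINA", "SC"),
  ("SP", "SP"),
  ("SAO PAULO", "SP"),
  ("SÃO PAULO", "SP"),
  ("SE", "SE"),
  ("SERGIPE", "SE"),
  ("TO", "TO"),
  ("TOCANTINS", "TO")]

def canonDict : PySem.Dict String String := PySem.Dict.ofList canonPairs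

def region_matches_alt (estado_permitido : String) (region_detectada : Option String) : Bool :=
  let permitido := pyNormalize (some estado_permitido)
  let detectada := pyNormalize region_detectada
  (permitido != "" && detectada != "") &&
    (canonDict.getD permitido permitido == canonDict.getD detectada detectada)

-- ===== PRECONDITION & SPEC =====
def Spec_region_matches (estado_permitido : String) (region_detectada : Option String) (out : Bool) : Prop := out = region_matches_alt estado_permitido region_detectada
instance (estado_permitido : String) (region_detectada : Option String) (out : Bool) : Decidable (Spec_region_matches estado_permitido region_detectada out) := by unfold Spec_region_matches; infer_instance

-- ===== CLAIM =====
def Claim_equal_region_matches : Prop := ∀ (estado_permitido : String) (region_detectada : Option String), Dom_region_matches estado_permitido region_detectada → Spec_region_matches estado_permitido region_detectada (region_matches estado_permitido region_detectada)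

-- ===== LEMMAS AND PROOFS =====

lemma brDict_items : brDict.items = brEquiv := by decide
set_option maxRecDepth 8000 in
lemma canonDict_items : canonDict.items = canonPairs := by decide
set_option maxRecDepth 8000 in
lemma canon_keys_nodup : canonDict.keys.Nodup := by decide
lemma sigla_mem_own (sn : String × List String) (h : sn ∈ brEquiv) : sn.1 ∈ sn.2 := by
  fin_cases h <;> decide
lemma brEquiv_keys_nodup : (brEquiv.map Prod.fst).Nodup := by decide
-- every name of an entry is in canonPairs with that entry's sigla
set_option maxRecDepth 8000 in
lemma canon_fwd : ∀ sn ∈ brEquiv, ∀ nm ∈ sn.2, (nm, sn.1) ∈ canonPairs := by decide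
-- every canonPairs pair comes from an entry of brEquiv
set_option maxRecDepth 8000 in
lemma canon_bwd : ∀ pr ∈ canonPairs, ∃ sn ∈ brEquiv, sn.1 = pr.2 ∧ pr.1 ∈ sn.2 := by decide
-- every value of canonPairs is itself a key (siglas map to themselves)
set_option maxRecDepth 8000 in
lemma canon_val_key : ∀ pr ∈ canonPairs, (pr.2, pr.2) ∈ canonPairs := by decide

-- entries of brEquiv are determined by their key
lemma entry_unique {sn sn' : String × List String} (h : sn ∈ brEquiv) (h' : sn' ∈ brEquiv)
    (hk : sn.1 = sn'.1) : sn = sn' := by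
  exact List.inj_on_of_nodup_map brEquiv_keys_nodup h h' hk

lemma canon_get_iff (x s : String) :
    canonDict.get? x = some s ↔ (x, s) ∈ canonPairs := by
  rw [PySem.Dict.get?_eq_some_iff_mem_items canonDict x s canon_keys_nodup, canonDict_items]

-- A's table scan (including the .get fast path) finds "some entry contains both"
lemma scanA_iff (p d : String) :
    ((match brDict.get? p with
      | some equiv => equiv.contains d
      | none => false) = true ∨
     (brDict.items.any (fun sn =>
        (sn.2.contains p && sn.2.contains d) ||
        (p == sn.1 && sn.2.contains d))) = true)
    ↔ ∃ sn ∈ brEquiv, p ∈ sn.2 ∧ d ∈ sn.2 := by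
  rw [brDict_items]
  constructor
  · rintro (hget | hany)
    · rcases hg : brDict.get? p with _ | equiv
      · rw [hg] at hget; simp at hget
      · rw [hg] at hget
        have hmem : (p, equiv) ∈ brDict.items :=
          PySem.Dict.mem_items_of_get?_eq_some brDict hg
        rw [brDict_items] at hmem
        have hp : p ∈ equiv := sigla_mem_own (p, equiv) hmem
        exact ⟨(p, equiv), hmem, hp, by simpa using hget⟩
    · rcases List.any_eq_true.mp hany with ⟨sn, hsn, hcond⟩
      simp only [Bool.or_eq_true, Bool.and_eq_true, List.contains_iff_mem, beq_iff_eq] at hcond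
      rcases hcond with ⟨hp, hd⟩ | ⟨hp, hd⟩
      · exact ⟨sn, hsn, hp, hd⟩
      · exact ⟨sn, hsn, hp ▸ sigla_mem_own sn hsn, hd⟩
  · rintro ⟨sn, hsn, hp, hd⟩
    right
    refine List.any_eq_true.mpr ⟨sn, hsn, ?_⟩
    simp only [Bool.or_eq_true, Bool.and_eq_true, List.contains_iff_mem]
    exact Or.inl ⟨hp, hd⟩

-- for p ≠ d, canonical forms agree iff some entry contains both
lemma canon_eq_iff (p d : String) (hpd : p ≠ d) :
    canonDict.getD p p = canonDict.getD d d ↔ ∃ sn ∈ brEquiv, p ∈ sn.2 ∧ d ∈ sn.2 := by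
  constructor
  · intro h
    rcases g1 : canonDict.get? p with _ | s1 <;>
      rcases g2 : canonDict.get? d with _ | s2
    · rw [PySem.Dict.getD_of_get?_eq_none canonDict p g1,
        PySem.Dict.getD_of_get?_eq_none canonDict d g2] at h
      exact absurd h hpd
    · rw [PySem.Dict.getD_of_get?_eq_none canonDict p g1,
        PySem.Dict.getD_of_get?_eq_some canonDict d g2] at h
      have hv : (s2, s2) ∈ canonPairs := canon_val_key _ ((canon_get_iff d s2).mp g2)
      have hcp : canonDict.get? p = some s2 := (canon_get_iff p s2).mpr (h ▸ hv)
      rw [g1] at hcp; exact absurd hcp (by simp)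
    · rw [PySem.Dict.getD_of_get?_eq_some canonDict p g1,
        PySem.Dict.getD_of_get?_eq_none canonDict d g2] at h
      have hv : (s1, s1) ∈ canonPairs := canon_val_key _ ((canon_get_iff p s1).mp g1)
      have hcp : canonDict.get? d = some s1 := (canon_get_iff d s1).mpr (h ▸ hv)
      rw [g2] at hcp; exact absurd hcp (by simp)
    · rw [PySem.Dict.getD_of_get?_eq_some canonDict p g1,
        PySem.Dict.getD_of_get?_eq_some canonDict d g2] at h
      subst h
      rcases canon_bwd _ ((canon_get_iff p s1).mp g1) with ⟨sn, hsn, hk, hp⟩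
      rcases canon_bwd _ ((canon_get_iff d s1).mp g2) with ⟨sn', hsn', hk', hd⟩
      have heq : sn = sn' := entry_unique hsn hsn' (by rw [hk, hk'])
      subst heq
      exact ⟨sn, hsn, hp, hd⟩
  · rintro ⟨sn, hsn, hp, hd⟩
    have g1 : canonDict.get? p = some sn.1 := (canon_get_iff p sn.1).mpr (canon_fwd sn hsn p hp)
    have g2 : canonDict.get? d = some sn.1 := (canon_get_iff d sn.1).mpr (canon_fwd sn hsn d hd)
    rw [PySem.Dict.getD_of_get?_eq_some canonDict p g1,
      PySem.Dict.getD_of_get?_eq_some canonDict d g2]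

-- the post-guard bodies agree when p ≠ d
lemma core_eq (p d : String) (hpd : p ≠ d) :
    ((fun hit => if hit then true
      else brDict.items.any (fun sn =>
        (sn.2.contains p && sn.2.contains d) ||
        (p == sn.1 && sn.2.contains d)))
      (match brDict.get? p with
       | some equiv => equiv.contains d
       | none => false))
    = (canonDict.getD p p == canonDict.getD d d) := by
  rw [Bool.eq_iff_iff]
  constructor
  · intro h
    have h' : ((match brDict.get? p with
        | some equiv => equiv.contains d
        | none => false) = true ∨
       (brDict.items.any (fun sn =>
          (sn.2.contains p && sn.2.contains d) ||
          (p == sn.1 && sn.2.contains d))) = true) := by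
      by_cases hhit : (match brDict.get? p with
        | some equiv => equiv.contains d
        | none => false) = true
      · exact Or.inl hhit
      · rw [Bool.not_eq_true] at hhit
        simp only [] at h
        rw [hhit] at h
        rw [if_neg (show ¬(false = true) by simp)] at h
        exact Or.inr h
    have hc := (canon_eq_iff p d hpd).mpr ((scanA_iff p d).mp h')
    simp [hc]
  · intro h
    have hc : canonDict.getD p p = canonDict.getD d d := by simpa using h
    have hA := (scanA_iff p d).mpr ((canon_eq_iff p d hpd).mp hc)
    by_cases hhit : (match brDict.get? p with
      | some equiv => equiv.contains d
      | none => false) = true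
    · simp only []
      rw [hhit]
      simp
    · rw [Bool.not_eq_true] at hhit
      simp only []
      rw [hhit]
      rw [if_neg (show ¬(false = true) by simp)]
      rcases hA with h1 | h2
      · rw [hhit] at h1; exact absurd h1 (by simp)
      · exact h2

-- the two whole bodies agree for all normalized strings p, d
lemma bodies_eq (p d : String) :
    (if p == "" then false
     else if d == "" then false
     else if p == d then true
     else
       (fun hit => if hit then true
        else brDict.items.any (fun sn =>
          (sn.2.contains p && sn.2.contains d) ||
          (p == sn.1 && sn.2.contains d)))
        (match brDict.get? p with
         | some equiv => equiv.contains d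
         | none => false))
    = ((p != "" && d != "") && (canonDict.getD p p == canonDict.getD d d)) := by
  by_cases hp : p = ""
  · simp [hp]
  · by_cases hd : d = ""
    · simp [hp, hd]
    · by_cases hpd : p = d
      · simp [hd, hpd]
      · have e1 : (p != "") = true := by simp [hp]
        have e2 : (d != "") = true := by simp [hd]
        simp only [beq_iff_eq, hp, hd, hpd, if_false, e1, e2, Bool.true_and]
        simpa using core_eq p d hpd

-- ===== VERDICT =====
theorem region_matches_spec : Claim_equal_region_matches := by
  intro ep rd _
  show region_matches ep rd = region_matches_alt ep rd
  unfold region_matches region_matches_alt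
  exact bodies_eq (pyNormalize (some ep)) (pyNormalize rd)
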